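-- pv_equiv track=rewrite | github.com/Astropilot/AdventOfCode | aoc_2023/day14/part2.py | guess_seq
-- ===== SOURCE A (Python) =====
-- def guess_seq(seq: list[int]) -> tuple[int, int] | None:
--     for i in range(len(seq)):
--         # n = seq[i]
--         try:
--             i2 = seq.index(seq[i], i + 1)
--         except ValueError:
--             i2 = -1
--         if i2 >= 0 and i2 - i > 1:
--             is_seq = True
--             for j in range(i + 1, i2):
--                 if i2 + (j - i) >= len(seq) or seq[j] != seq[i2 + (j - i)]:
--                     is_seq = False
--                     break
--             if is_seq:
--                 return i, i2 - i
--     return None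
-- ===== SOURCE B (Python) =====
-- def guess_seq(seq: list[int]) -> tuple[int, int] | None:
--     # Period-major sliding-window search: for each candidate period p, one pass
--     # with a running match-streak counter finds every window that repeats with
--     # period p; keep the candidate with the smallest start (its period is then
--     # unique because of the first-reoccurrence condition).
--     n = len(seq)
--     best = None
--     for p in range(2, n // 2 + 1):
--         run = 0
--         for t in range(n - p):
--             run = run + 1 if seq[t] == seq[t + p] else 0
--             if run >= p:
--                 i = t - p + 1
--                 if seq[i] not in seq[i + 1:i + p] and (best is None or i < best[0]):
--                     best = (i, p)
--     return best
-- ===== Notes on version B (the rewrite author's own statement) =====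
-- stated objective: alternative
-- what changed: A scans starts i, finds the next occurrence of seq[i] with repeated list.index calls and verifies the period element-by-element with a break flag; B searches period-major: for each candidate period p one sliding pass with a running match-streak counter detects every window repeating with period p, and the candidate with the smallest start is kept (its period is unique by the first-reoccurrence condition).
import Mathlib
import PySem

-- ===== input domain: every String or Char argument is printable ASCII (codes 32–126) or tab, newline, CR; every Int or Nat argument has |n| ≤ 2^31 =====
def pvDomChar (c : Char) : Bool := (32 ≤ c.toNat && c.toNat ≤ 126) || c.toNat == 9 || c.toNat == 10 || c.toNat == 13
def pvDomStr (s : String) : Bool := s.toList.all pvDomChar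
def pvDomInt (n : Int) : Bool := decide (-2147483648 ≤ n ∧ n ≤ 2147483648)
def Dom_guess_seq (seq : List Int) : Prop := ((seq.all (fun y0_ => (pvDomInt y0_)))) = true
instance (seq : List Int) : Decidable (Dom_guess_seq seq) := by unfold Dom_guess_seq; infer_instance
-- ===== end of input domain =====

-- B replaces A's start-major search (next occurrence via list.index, then an
-- element-by-element verification loop) by a period-major sliding-window scan
-- with a running match-streak counter, keeping the candidate of smallest start.

-- ===== PORT A =====
-- seq.index(v, start) with try/except ValueError → -1: first index ≥ start holding v, else -1
def pvIndexFrom (seq : List Int) (v : Int) (start : Nat) : Int :=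
  match PySem.List.index? (seq.drop start) v with
  | some k => ((start + k : Nat) : Int)
  | none => -1

-- the inner 'for j in range(i+1, i2)' loop with its break flag (all = loop until flag falls)
def pvInnerCheck (seq : List Int) (i i2 : Int) : Bool :=
  (PySem.List.pyRange (i + 1) i2 1).all (fun j =>
    decide (i2 + (j - i) < (seq.length : Int)) &&
      (PySem.List.pyGetD seq j 0 == PySem.List.pyGetD seq (i2 + (j - i)) 0))

def pvStepA (seq : List Int) (i : Int) : Option (List Int) :=
  let i2 : Int :=
    if 0 ≤ i then pvIndexFrom seq (PySem.List.pyGetD seq i 0) (i.toNat + 1) else -1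
  if 0 ≤ i2 ∧ i2 - i > 1 then
    if pvInnerCheck seq i i2 then some [i, i2 - i] else none
  else none

def guess_seq (seq : List Int) : Option (List Int) :=
  (PySem.List.pyRange 0 (seq.length : Int) 1).findSome? (pvStepA seq)

-- ===== PORT B =====
-- the body of B's inner 'for t in range(n - p)' loop: update the streak counter;
-- when the last p positions all matched, window [t-p+1, t+p+1) repeats with
-- period p: record [i, p] if first-reoccurrence holds and i beats the best so far
def pvInnerStep (seq : List Int) (p : Int) (st : Option (List Int) × Int) (t : Int) :
    Option (List Int) × Int :=
  let run : Int :=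
    if PySem.List.pyGetD seq t 0 == PySem.List.pyGetD seq (t + p) 0 then st.2 + 1 else 0
  let best :=
    if p ≤ run then
      let i := t - p + 1
      if (!(PySem.List.slice seq (some (i + 1)) (some (i + p))).contains
            (PySem.List.pyGetD seq i 0)
          && (match st.1 with
              | none => true
              | some b => decide (i < PySem.List.pyGetD b 0 0))) then
        some [i, p]
      else st.1
    else st.1
  (best, run)

def guess_seq_alt (seq : List Int) : Option (List Int) :=
  let n : Int := (seq.length : Int)
  (PySem.List.pyRange 2 (PySem.Int.floordiv n 2 + 1) 1).foldl
    (fun best p => ((PySem.List.pyRange 0 (n - p) 1).foldl (pvInnerStep seq p) (best, 0)).1)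
    none

-- ===== PRECONDITION & SPEC =====
def Spec_guess_seq (seq : List Int) (out : Option (List Int)) : Prop := out = guess_seq_alt seq
instance (seq : List Int) (out : Option (List Int)) : Decidable (Spec_guess_seq seq out) := by unfold Spec_guess_seq; infer_instance

-- ===== CLAIM (what is proved, stated in full; the proofs are below) =====
def Claim_equal_guess_seq : Prop := ∀ (seq : List Int), Dom_guess_seq seq → Spec_guess_seq seq (guess_seq seq)

-- ===== LEMMAS AND PROOFS =====

-- a (start, period) pair is "valid" iff A would return it from start i:
-- p ≥ 2, the 2p-window fits, the window repeats with period p, and seq[i]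
-- does not reoccur strictly inside the first period
def pvMatch (seq : List Int) (p t : Nat) : Bool := seq.getD t 0 == seq.getD (t + p) 0

def pvWin (seq : List Int) (i p : Nat) : Bool :=
  (List.range p).all (fun c => pvMatch seq p (i + c))

def pvFO (seq : List Int) (i p : Nat) : Bool :=
  (List.range (p - 1)).all (fun d => !(seq.getD (i + 1 + d) 0 == seq.getD i 0))

def pvValid (seq : List Int) (i p : Nat) : Bool :=
  decide (2 ≤ p) && decide (i + 2 * p ≤ seq.length) && pvWin seq i p && pvFO seq i p

-- the streak counter value after B's inner loop has processed positions 0..t-1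
def pvStreak (seq : List Int) (p : Nat) : Nat → Nat
  | 0 => 0
  | t + 1 => if pvMatch seq p t then pvStreak seq p t + 1 else 0

-- "b is the best-so-far over the pairs satisfying P": none iff no pair,
-- else a pair of minimal start
def pvBestInv (P : Nat → Nat → Prop) (b : Option (List Int)) : Prop :=
  match b with
  | none => ∀ i q, ¬ P i q
  | some out => ∃ i q, P i q ∧ out = [(i : Int), (q : Int)] ∧ ∀ i' q', P i' q' → i ≤ i'

-- pairs already covered once the inner loop for period p has processed t steps
def pvPair (seq : List Int) (p t i q : Nat) : Prop :=
  pvValid seq i q = true ∧ (q < p ∨ (q = p ∧ i + q ≤ t))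

-- pairs covered once all periods ≤ p are done
def pvT (seq : List Int) (p i q : Nat) : Prop := pvValid seq i q = true ∧ q ≤ p

theorem pvBestInv_congr {P Q : Nat → Nat → Prop} (h : ∀ i q, P i q ↔ Q i q) {b : Option (List Int)}
    (hb : pvBestInv P b) : pvBestInv Q b := by
  cases b with
  | none => intro i q hq; exact hb i q ((h i q).mpr hq)
  | some out =>
    obtain ⟨i, q, h1, h2, h3⟩ := hb
    exact ⟨i, q, (h i q).mp h1, h2, fun i' q' hq' => h3 i' q' ((h i' q').mpr hq')⟩

theorem pvMatch_iff (seq : List Int) (p t : Nat) :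
    pvMatch seq p t = true ↔ seq.getD t 0 = seq.getD (t + p) 0 := by
  simp [pvMatch]

theorem pvValid_iff (seq : List Int) (i p : Nat) :
    pvValid seq i p = true ↔
      (2 ≤ p ∧ i + 2 * p ≤ seq.length ∧
        (∀ c < p, seq.getD (i + c) 0 = seq.getD (i + c + p) 0) ∧
        (∀ d < p - 1, seq.getD (i + 1 + d) 0 ≠ seq.getD i 0)) := by
  unfold pvValid pvWin pvFO pvMatch
  simp only [Bool.and_eq_true, decide_eq_true_eq, List.all_eq_true, List.mem_range,
    beq_iff_eq, Bool.not_eq_true', beq_eq_false_iff_ne, ne_eq]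
  tauto

theorem pvStreak_le (seq : List Int) (p : Nat) : ∀ t, pvStreak seq p t ≤ t := by
  intro t
  induction t with
  | zero => simp [pvStreak]
  | succ t ih => simp only [pvStreak]; split <;> omega

theorem pvStreak_ge_iff (seq : List Int) (p : Nat) :
    ∀ t r, r ≤ pvStreak seq p t ↔ (r ≤ t ∧ ∀ c < r, pvMatch seq p (t - 1 - c) = true) := by
  intro t
  induction t with
  | zero =>
    intro r
    constructor
    · intro hr
      have : r = 0 := by have := pvStreak_le seq p 0; omega
      subst this
      exact ⟨Nat.le_refl 0, fun c hc => absurd hc (by omega)⟩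
    · intro h; simpa [pvStreak] using h.1
  | succ t ih =>
    intro r
    by_cases hm : pvMatch seq p t = true
    · simp only [pvStreak, if_pos hm]
      constructor
      · intro hr
        rcases Nat.eq_zero_or_pos r with h0 | h0
        · subst h0
          exact ⟨by omega, fun c hc => absurd hc (by omega)⟩
        · have hsr : r - 1 ≤ pvStreak seq p t := by omega
          obtain ⟨hle, hall⟩ := (ih (r - 1)).mp hsr
          refine ⟨by omega, ?_⟩
          intro c hc
          rcases Nat.eq_zero_or_pos c with rfl | hc0
          · have e : t + 1 - 1 - 0 = t := by omega
            rw [e]; exact hm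
          · have h2 := hall (c - 1) (by omega)
            have e : t - 1 - (c - 1) = t + 1 - 1 - c := by omega
            rwa [e] at h2
      · rintro ⟨hr, hall⟩
        rcases Nat.eq_zero_or_pos r with rfl | h0
        · omega
        · have := (ih (r - 1)).mpr ⟨by omega, fun c hc => by
            have h2 := hall (c + 1) (by omega)
            have e : t + 1 - 1 - (c + 1) = t - 1 - c := by omega
            rwa [e] at h2⟩
          omega
    · simp only [pvStreak, if_neg hm]
      constructor
      · intro hr
        have : r = 0 := by omega
        subst this
        exact ⟨by omega, fun c hc => absurd hc (by omega)⟩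
      · rintro ⟨hr, hall⟩
        rcases Nat.eq_zero_or_pos r with rfl | h0
        · omega
        · exfalso
          apply hm
          have h2 := hall 0 h0
          have e : t + 1 - 1 - 0 = t := by omega
          rwa [e] at h2

theorem pvWin_iff (seq : List Int) (p t : Nat) (h : p ≤ t + 1) :
    (∀ c < p, seq.getD (t + 1 - p + c) 0 = seq.getD (t + 1 - p + c + p) 0) ↔
      (∀ c < p, pvMatch seq p (t - c) = true) := by
  constructor
  · intro H c hc
    rw [pvMatch_iff]
    have h2 := H (p - 1 - c) (by omega)
    have e1 : t + 1 - p + (p - 1 - c) = t - c := by omega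
    rw [e1] at h2
    exact h2
  · intro H c hc
    have h2 := (pvMatch_iff seq p (t - (p - 1 - c))).mp (H (p - 1 - c) (by omega))
    have e1 : t - (p - 1 - c) = t + 1 - p + c := by omega
    rw [e1] at h2
    exact h2

-- getD through drop, unconditional (out of range gives the default on both sides)
theorem pv_getD_drop (xs : List Int) (s j : Nat) :
    (xs.drop s).getD j 0 = xs.getD (s + j) 0 := by
  rw [List.getD_eq_getElem?_getD, List.getElem?_drop, ← List.getD_eq_getElem?_getD]

theorem pvFO_iff (seq : List Int) (i p : Nat) (h2 : 2 ≤ p) (hb : i + p ≤ seq.length) :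
    pvFO seq i p = true ↔ seq.getD i 0 ∉ (seq.drop (i + 1)).take (p - 1) := by
  unfold pvFO
  simp only [List.all_eq_true, List.mem_range, Bool.not_eq_true', beq_eq_false_iff_ne, ne_eq]
  have hlen : ((seq.drop (i + 1)).take (p - 1)).length = p - 1 := by
    simp only [List.length_take, List.length_drop]
    omega
  constructor
  · intro H hmem
    obtain ⟨d, hd, hval⟩ := List.mem_iff_getElem.mp hmem
    rw [List.getElem_take, List.getElem_drop] at hval
    have hd' : d < p - 1 := by rw [hlen] at hd; exact hd
    have hlt : i + 1 + d < seq.length := by omega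
    apply H d hd'
    rw [List.getD_eq_getElem?_getD, List.getElem?_eq_getElem hlt]
    simpa using hval
  · intro H d hd heq
    apply H
    apply List.mem_iff_getElem.mpr
    have hlt : i + 1 + d < seq.length := by omega
    refine ⟨d, by rw [hlen]; exact hd, ?_⟩
    rw [List.getElem_take, List.getElem_drop]
    rw [List.getD_eq_getElem?_getD, List.getElem?_eq_getElem hlt] at heq
    simpa using heq

-- first-match characterization of index? (backward direction)
theorem pv_index?_of_first (v : Int) :
    ∀ (l : List Int) (j : Nat), j < l.length → l.getD j 0 = v →
      (∀ j' < j, l.getD j' 0 ≠ v) → PySem.List.index? l v = some j := by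
  intro l
  induction l with
  | nil => intro j hj; simp at hj
  | cons x xs ih =>
    intro j hj hval hfirst
    cases j with
    | zero =>
      simp only [List.getD_cons_zero] at hval
      subst hval
      exact PySem.List.index?_cons_self x xs
    | succ j =>
      have hne : x ≠ v := by
        have := hfirst 0 (by omega)
        simpa using this
      rw [PySem.List.index?_cons_of_ne _ hne]
      have := ih j (by simpa using hj) (by simpa using hval)
        (fun j' hj' => by have := hfirst (j' + 1) (by omega); simpa using this)
      rw [this]
      rfl

theorem pvIndexFrom_of_first (seq : List Int) (v : Int) (s m : Nat)
    (hm : m < seq.length) (hsm : s ≤ m) (hval : seq.getD m 0 = v)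
    (hfirst : ∀ u, s ≤ u → u < m → seq.getD u 0 ≠ v) :
    pvIndexFrom seq v s = (m : Int) := by
  unfold pvIndexFrom
  have hidx : PySem.List.index? (seq.drop s) v = some (m - s) := by
    apply pv_index?_of_first
    · rw [List.length_drop]; omega
    · rw [pv_getD_drop]
      have e : s + (m - s) = m := by omega
      rw [e]; exact hval
    · intro j' hj'
      rw [pv_getD_drop]
      exact hfirst (s + j') (by omega) (by omega)
  rw [hidx]
  show ((s + (m - s) : Nat) : Int) = (m : Int)
  omega

theorem pvIndexFrom_spec (seq : List Int) (v : Int) (s : Nat) (m : Int)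
    (h : pvIndexFrom seq v s = m) (h0 : 0 ≤ m) :
    ∃ mN : Nat, m = (mN : Int) ∧ s ≤ mN ∧ mN < seq.length ∧ seq.getD mN 0 = v ∧
      ∀ u, s ≤ u → u < mN → seq.getD u 0 ≠ v := by
  unfold pvIndexFrom at h
  cases hix : PySem.List.index? (seq.drop s) v with
  | none =>
    rw [hix] at h
    have h' : (-1 : Int) = m := h
    omega
  | some k =>
    rw [hix] at h
    have h' : ((s + k : Nat) : Int) = m := h
    obtain ⟨hk, hval, hfirst⟩ := PySem.List.getElem_of_index?_eq_some hix
    have hklen : s + k < seq.length := by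
      have := hk; rw [List.length_drop] at this; omega
    refine ⟨s + k, h'.symm, by omega, hklen, ?_, ?_⟩
    · rw [List.getD_eq_getElem?_getD, List.getElem?_eq_getElem hklen]
      rw [List.getElem_drop] at hval
      simpa using hval
    · intro u hsu hum
      have hj : u - s < k := by omega
      have h1 := hfirst (u - s) hj
      rw [List.getElem_drop] at h1
      have hlt2 : s + (u - s) < seq.length := by omega
      have h2 : seq.getD (s + (u - s)) 0 ≠ v := by
        rw [List.getD_eq_getElem?_getD, List.getElem?_eq_getElem hlt2]
        simpa using h1
      have e : s + (u - s) = u := by omega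
      rwa [e] at h2

-- the inner verification loop of A, in terms of plain getD conditions
theorem pvInnerCheck_iff (seq : List Int) (k p : Nat) :
    pvInnerCheck seq (k : Int) ((k + p : Nat) : Int) = true ↔
      ∀ c < p - 1, k + p + 1 + c < seq.length ∧
        seq.getD (k + 1 + c) 0 = seq.getD (k + p + 1 + c) 0 := by
  unfold pvInnerCheck
  rw [PySem.List.pyRange_one, List.all_map, List.all_eq_true]
  have hN : (((k + p : Nat) : Int) - ((k : Int) + 1)).toNat = p - 1 := by
    push_cast; omega
  rw [hN]
  have hcond : ∀ c : Nat,
      ((decide (((k + p : Nat) : Int) + ((k : Int) + 1 + (c : Int) - (k : Int)) < (seq.length : Int)) &&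
        (PySem.List.pyGetD seq ((k : Int) + 1 + (c : Int)) 0 ==
          PySem.List.pyGetD seq (((k + p : Nat) : Int) + ((k : Int) + 1 + (c : Int) - (k : Int))) 0))
      = (decide (k + p + 1 + c < seq.length) &&
          (seq.getD (k + 1 + c) 0 == seq.getD (k + p + 1 + c) 0))) := by
    intro c
    have e2 : ((k + p : Nat) : Int) + ((k : Int) + 1 + (c : Int) - (k : Int)) = ((k + p + 1 + c : Nat) : Int) := by
      push_cast; ring
    have e1 : (k : Int) + 1 + (c : Int) = ((k + 1 + c : Nat) : Int) := by push_cast; ring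
    rw [e2, e1]
    simp only [PySem.List.pyGetD_natCast]
    congr 1
    simp only [decide_eq_decide]
    constructor <;> intro h <;> omega
  constructor
  · intro hall c hc
    have := hall c (List.mem_range.mpr hc)
    simp only [Function.comp_apply] at this
    rw [hcond c] at this
    simpa using this
  · intro h c hc
    rw [List.mem_range] at hc
    simp only [Function.comp_apply]
    rw [hcond c]
    simpa using h c hc

-- ----- characterization of A's per-start step -----

theorem pvStepA_some (seq : List Int) (k p : Nat) (h : pvValid seq k p = true) :
    pvStepA seq (k : Int) = some [(k : Int), (p : Int)] := by
  rw [pvValid_iff] at h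
  obtain ⟨h2, hb, hw, hf⟩ := h
  have hidx : pvIndexFrom seq (seq.getD k 0) (k + 1) = ((k + p : Nat) : Int) := by
    apply pvIndexFrom_of_first seq _ (k + 1) (k + p) (by omega) (by omega)
    · have := hw 0 (by omega)
      simpa using this.symm
    · intro u hu1 hu2
      have := hf (u - (k + 1)) (by omega)
      have e : k + 1 + (u - (k + 1)) = u := by omega
      rwa [e] at this
  unfold pvStepA
  rw [if_pos (Int.natCast_nonneg k)]
  simp only [PySem.List.pyGetD_natCast, Int.toNat_natCast]
  rw [hidx]
  rw [show ((k + p : Nat) : Int) - (k : Int) = (p : Int) from by push_cast; ring]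
  rw [if_pos ⟨by positivity, by exact_mod_cast (by omega : (1 : Int) < (p : Nat))⟩]
  rw [if_pos ((pvInnerCheck_iff seq k p).mpr ?_)]
  · intro c hc
    refine ⟨by omega, ?_⟩
    have h3 := hw (c + 1) (by omega)
    have e1 : k + (c + 1) = k + 1 + c := by omega
    rw [e1] at h3
    have e2 : k + 1 + c + p = k + p + 1 + c := by omega
    rwa [e2] at h3

theorem pvStepA_none (seq : List Int) (k : Nat) (hval : ∀ p, pvValid seq k p = false) :
    pvStepA seq (k : Int) = none := by
  unfold pvStepA
  rw [if_pos (Int.natCast_nonneg k)]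
  simp only [PySem.List.pyGetD_natCast, Int.toNat_natCast]
  by_cases hge : 0 ≤ pvIndexFrom seq (seq.getD k 0) (k + 1)
  · obtain ⟨m, hm, hsm, hmlen, hvm, hfirst⟩ :=
      pvIndexFrom_spec seq (seq.getD k 0) (k + 1) _ rfl hge
    rw [hm]
    by_cases hp : (m : Int) - (k : Int) > 1
    · rw [if_pos ⟨by positivity, hp⟩]
      have hkm : k + 2 ≤ m := by omega
      obtain ⟨p, rfl⟩ : ∃ p, m = k + p := ⟨m - k, by omega⟩
      have hp2 : 2 ≤ p := by omega
      have hchk : pvInnerCheck seq (k : Int) ((k + p : Nat) : Int) = false := by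
        by_contra hB
        have hB' : pvInnerCheck seq (k : Int) ((k + p : Nat) : Int) = true := by
          revert hB; cases pvInnerCheck seq (k : Int) ((k + p : Nat) : Int) <;> simp
        have hcc := (pvInnerCheck_iff seq k p).mp hB'
        have hvalid : pvValid seq k p = true := by
          rw [pvValid_iff]
          refine ⟨by omega, ?_, ?_, ?_⟩
          · have := (hcc (p - 2) (by omega)).1
            omega
          · intro c hc
            rcases Nat.eq_zero_or_pos c with rfl | hc0
            · have e : k + 0 + p = k + p := by omega
              rw [e, Nat.add_zero]
              exact hvm.symm
            · have h4 := (hcc (c - 1) (by omega)).2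
              have e1 : k + 1 + (c - 1) = k + c := by omega
              rw [e1] at h4
              have e2 : k + p + 1 + (c - 1) = k + c + p := by omega
              rwa [e2] at h4
          · intro d hd
            exact hfirst (k + 1 + d) (by omega) (by omega)
        rw [hval p] at hvalid
        exact absurd hvalid (by simp)
      rw [if_neg (by rw [hchk]; simp)]
    · rw [if_neg (fun hc => hp hc.2)]
  · rw [if_neg (fun hc => hge hc.1)]

-- ----- characterization of B's loops -----

-- run a foldl over List.range n while maintaining an indexed invariant
theorem pvFoldl_inv {α : Type} (n : Nat) (f : α → Nat → α) (I : Nat → α → Prop) (init : α)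
    (h0 : I 0 init) (hs : ∀ k a, k < n → I k a → I (k + 1) (f a k)) :
    I n ((List.range n).foldl f init) := by
  induction n with
  | zero => simpa using h0
  | succ n ih =>
    rw [List.range_succ, List.foldl_append, List.foldl_cons, List.foldl_nil]
    exact hs n _ (by omega) (ih (fun k a hk => hs k a (by omega)))

theorem pvPair_succ (seq : List Int) (p t i q : Nat) :
    pvPair seq p (t + 1) i q ↔
      pvPair seq p t i q ∨ (q = p ∧ i + p = t + 1 ∧ pvValid seq i q = true) := by
  unfold pvPair
  constructor
  · rintro ⟨hv, hd⟩
    rcases hd with hlt | ⟨hqe, hle⟩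
    · exact Or.inl ⟨hv, Or.inl hlt⟩
    · by_cases h : i + q ≤ t
      · exact Or.inl ⟨hv, Or.inr ⟨hqe, h⟩⟩
      · exact Or.inr ⟨hqe, by omega, hv⟩
  · rintro (⟨hv, hd⟩ | ⟨hqe, he, hv⟩)
    · exact ⟨hv, by omega⟩
    · exact ⟨hv, Or.inr ⟨hqe, by omega⟩⟩

theorem pvInnerStep_inv (seq : List Int) (p t : Nat) (h2 : 2 ≤ p) (ht : t + p < seq.length)
    (st : Option (List Int) × Int)
    (hrun : st.2 = (pvStreak seq p t : Int))
    (hbest : pvBestInv (pvPair seq p t) st.1) :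
    (pvInnerStep seq (p : Int) st (t : Int)).2 = (pvStreak seq p (t + 1) : Int) ∧
      pvBestInv (pvPair seq p (t + 1)) (pvInnerStep seq (p : Int) st (t : Int)).1 := by
  obtain ⟨b, r⟩ := st
  simp only at hrun hbest
  have hmatch : (PySem.List.pyGetD seq (t : Int) 0 == PySem.List.pyGetD seq ((t : Int) + (p : Int)) 0)
      = pvMatch seq p t := by
    rw [show (t : Int) + (p : Int) = ((t + p : Nat) : Int) from by push_cast; ring,
      PySem.List.pyGetD_natCast, PySem.List.pyGetD_natCast]
    rfl
  unfold pvInnerStep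
  simp only [hmatch, hrun]
  have hrun' : (if pvMatch seq p t then (pvStreak seq p t : Int) + 1 else 0)
      = (pvStreak seq p (t + 1) : Int) := by
    by_cases hm : pvMatch seq p t = true
    · simp [pvStreak, hm]
    · simp [pvStreak, hm]
  rw [hrun']
  refine ⟨rfl, ?_⟩
  by_cases hge : (p : Int) ≤ (pvStreak seq p (t + 1) : Int)
  · have hgeN : p ≤ pvStreak seq p (t + 1) := by exact_mod_cast hge
    obtain ⟨hpt, hall⟩ := (pvStreak_ge_iff seq p (t + 1) p).mp hgeN
    have hall' : ∀ c < p, pvMatch seq p (t - c) = true := by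
      intro c hc
      have h3 := hall c hc
      have e : t + 1 - 1 - c = t - c := by omega
      rwa [e] at h3
    set iN := t + 1 - p with hiN
    have hwin : ∀ c < p, seq.getD (iN + c) 0 = seq.getD (iN + c + p) 0 :=
      (pvWin_iff seq p t hpt).mpr hall'
    have hbnd : iN + 2 * p ≤ seq.length := by omega
    have hiEq : (t : Int) - (p : Int) + 1 = (iN : Int) := by omega
    rw [if_pos hge, hiEq]
    have hslice : PySem.List.slice seq (some ((iN : Int) + 1)) (some ((iN : Int) + (p : Int)))
        = (seq.drop (iN + 1)).take (p - 1) := by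
      have e1 : (iN : Int) + 1 = ((iN + 1 : Nat) : Int) := by push_cast; ring
      have e2 : (iN : Int) + (p : Int) = ((iN + p : Nat) : Int) := by push_cast; ring
      rw [e1, e2, PySem.List.slice_natCast]
      congr 1
      omega
    rw [hslice]
    simp only [PySem.List.pyGetD_natCast]
    have hfo_iff := pvFO_iff seq iN p h2 (by omega)
    by_cases hfo : pvFO seq iN p = true
    · -- the candidate is valid
      have hfoP : ∀ d < p - 1, seq.getD (iN + 1 + d) 0 ≠ seq.getD iN 0 := by
        have h3 := hfo
        unfold pvFO at h3
        simp only [List.all_eq_true, List.mem_range, Bool.not_eq_true', beq_eq_false_iff_ne,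
          ne_eq] at h3
        exact h3
      have hvalid : pvValid seq iN p = true :=
        (pvValid_iff seq iN p).mpr ⟨h2, hbnd, hwin, hfoP⟩
      have hnotmem : seq.getD iN 0 ∉ (seq.drop (iN + 1)).take (p - 1) := hfo_iff.mp hfo
      rw [show ((seq.drop (iN + 1)).take (p - 1)).contains (seq.getD iN 0) = false from by
        simpa using hnotmem]
      cases b with
      | none =>
        simp only [Bool.not_false, Bool.true_and, if_true]
        refine ⟨iN, p, ?_, rfl, ?_⟩
        · exact (pvPair_succ seq p t iN p).mpr (Or.inr ⟨rfl, by omega, hvalid⟩)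
        · intro i' q' hq'
          rcases (pvPair_succ seq p t i' q').mp hq' with hold | ⟨_, he, _⟩
          · exact absurd hold (hbest i' q')
          · omega
      | some out =>
        obtain ⟨i0, q0, hp0, rfl, hmin⟩ := hbest
        simp only [Bool.not_false, Bool.true_and, PySem.List.pyGetD_zero_cons]
        by_cases hlt : (iN : Int) < (i0 : Int)
        · rw [if_pos (by simpa using hlt)]
          refine ⟨iN, p, ?_, rfl, ?_⟩
          · exact (pvPair_succ seq p t iN p).mpr (Or.inr ⟨rfl, by omega, hvalid⟩)
          · intro i' q' hq'
            have hlt' : iN < i0 := by exact_mod_cast hlt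
            rcases (pvPair_succ seq p t i' q').mp hq' with hold | ⟨_, he, _⟩
            · have := hmin i' q' hold
              omega
            · omega
        · rw [if_neg (by simpa using hlt)]
          refine ⟨i0, q0, (pvPair_succ seq p t i0 q0).mpr (Or.inl hp0), rfl, ?_⟩
          intro i' q' hq'
          have hle' : i0 ≤ iN := by omega
          rcases (pvPair_succ seq p t i' q').mp hq' with hold | ⟨_, he, _⟩
          · exact hmin i' q' hold
          · omega
    · -- first-reoccurrence fails: nothing recorded, and no new valid pair exists
      have hmem : seq.getD iN 0 ∈ (seq.drop (iN + 1)).take (p - 1) := by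
        by_contra hnm
        exact hfo (hfo_iff.mpr hnm)
      rw [show ((seq.drop (iN + 1)).take (p - 1)).contains (seq.getD iN 0) = true from by
        simpa using hmem]
      simp only [Bool.not_true, Bool.false_and, Bool.false_eq_true, if_false]
      apply pvBestInv_congr _ hbest
      intro i' q'
      rw [pvPair_succ]
      constructor
      · exact Or.inl
      · rintro (hold | ⟨hqe, he, hv⟩)
        · exact hold
        · exfalso
          apply hfo
          have hi' : i' = iN := by omega
          subst hi'
          rw [hqe] at hv
          rw [pvValid_iff] at hv
          unfold pvFO
          simp only [List.all_eq_true, List.mem_range, Bool.not_eq_true', beq_eq_false_iff_ne,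
            ne_eq]
          exact hv.2.2.2
  · rw [if_neg hge]
    apply pvBestInv_congr _ hbest
    intro i' q'
    rw [pvPair_succ]
    constructor
    · exact Or.inl
    · rintro (hold | ⟨hqe, he, hv⟩)
      · exact hold
      · exfalso
        apply hge
        rw [hqe] at hv
        rw [pvValid_iff] at hv
        have hi' : i' = t + 1 - p := by omega
        have hwin := hv.2.2.1
        rw [hi'] at hwin
        have hallm : ∀ c < p, pvMatch seq p (t - c) = true :=
          (pvWin_iff seq p t (by omega)).mp hwin
        have hs : p ≤ pvStreak seq p (t + 1) := by
          apply (pvStreak_ge_iff seq p (t + 1) p).mpr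
          refine ⟨by omega, ?_⟩
          intro c hc
          have h3 := hallm c hc
          have e : t + 1 - 1 - c = t - c := by omega
          rwa [e]
        exact_mod_cast Nat.cast_le.mpr hs

theorem pvValid_facts (seq : List Int) (i q : Nat) (h : pvValid seq i q = true) :
    2 ≤ q ∧ i + 2 * q ≤ seq.length := by
  rw [pvValid_iff] at h
  exact ⟨h.1, h.2.1⟩

-- B's final accumulator is the minimal-start valid pair (or none)
theorem guess_seq_alt_best (seq : List Int) :
    pvBestInv (fun i q => pvValid seq i q = true) (guess_seq_alt seq) := by
  unfold guess_seq_alt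
  have hfd : PySem.Int.floordiv ((seq.length : Nat) : Int) 2 = ((seq.length / 2 : Nat) : Int) := by
    exact_mod_cast PySem.Int.floordiv_natCast seq.length 2
  simp only [hfd, PySem.List.pyRange_one, List.foldl_map, zero_add, sub_zero]
  set N := ((((seq.length / 2 : Nat) : Int) + 1) - 2).toNat with hNdef
  have hN : N = seq.length / 2 - 1 := by omega
  clear_value N
  clear hNdef
  refine pvBestInv_congr ?_ (pvFoldl_inv N _ (fun k best => pvBestInv (pvT seq (1 + k)) best)
    none ?_ ?_)
  · -- pvT (1 + N) covers exactly the valid pairs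
    intro i q
    unfold pvT
    constructor
    · exact fun h => h.1
    · intro hv
      obtain ⟨h2q, hb⟩ := pvValid_facts seq i q hv
      refine ⟨hv, ?_⟩
      omega
  · -- before the outer loop: no valid pair has period ≤ 1
    intro i q hq
    obtain ⟨h2q, _⟩ := pvValid_facts seq i q hq.1
    have hle := hq.2
    omega
  · -- one outer iteration: period p = 2 + k
    intro k best hk hbest
    set p := 2 + k with hpdef
    have hple : p ≤ seq.length := by omega
    have hpe : (2 : Int) + (k : Int) = ((p : Nat) : Int) := by omega
    simp only [hpe]
    set M := (((seq.length : Int) - ((p : Nat) : Int))).toNat with hMdef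
    have hM : M = seq.length - p := by omega
    clear_value M
    clear hMdef
    have hres := pvFoldl_inv M
      (fun st (x : Nat) => pvInnerStep seq ((p : Nat) : Int) st ((x : Nat) : Int))
      (fun t st => st.2 = (pvStreak seq p t : Int) ∧ pvBestInv (pvPair seq p t) st.1)
      (best, 0) ?_ ?_
    · apply pvBestInv_congr _ hres.2
      intro i q
      unfold pvPair pvT
      constructor
      · rintro ⟨hv, hd⟩
        exact ⟨hv, by omega⟩
      · rintro ⟨hv, hle⟩
        refine ⟨hv, ?_⟩
        by_cases hq : q < p
        · exact Or.inl hq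
        · have hqp : q = p := by omega
          obtain ⟨_, hb⟩ := pvValid_facts seq i q hv
          right
          exact ⟨hqp, by omega⟩
    · constructor
      · simp [pvStreak]
      · apply pvBestInv_congr _ hbest
        intro i q
        unfold pvT pvPair
        constructor
        · rintro ⟨hv, hle⟩
          obtain ⟨h2q, _⟩ := pvValid_facts seq i q hv
          exact ⟨hv, Or.inl (by omega)⟩
        · rintro ⟨hv, hd⟩
          obtain ⟨h2q, _⟩ := pvValid_facts seq i q hv
          refine ⟨hv, ?_⟩
          rcases hd with h | ⟨rfl, hle⟩
          · omega
          · omega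
    · intro t st ht hI
      exact pvInnerStep_inv seq p t (by omega) (by omega) st hI.1 hI.2

-- ----- assembling the two sides -----

theorem pv_findSome?_range_first {β : Type} (f : Nat → Option β) (n i0 : Nat) (v : β)
    (hi : i0 < n) (hnone : ∀ j < i0, f j = none) (hsome : f i0 = some v) :
    (List.range n).findSome? f = some v := by
  induction n with
  | zero => omega
  | succ n ih =>
    rw [List.range_succ, List.findSome?_append]
    by_cases h : i0 < n
    · rw [ih h]; rfl
    · have he : i0 = n := by omega
      subst he
      have hz : (List.range i0).findSome? f = none :=
        List.findSome?_eq_none_iff.mpr (fun x hx => hnone x (List.mem_range.mp hx))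
      rw [hz]
      simp [List.findSome?, hsome]

theorem guess_seq_eq_range (seq : List Int) :
    guess_seq seq = (List.range seq.length).findSome? (fun k : Nat => pvStepA seq (k : Int)) := by
  unfold guess_seq
  simp only [PySem.List.pyRange_one, List.findSome?_map, zero_add, sub_zero,
    Int.toNat_natCast]
  rfl

-- ===== VERDICT (by name: the statement is the Claim_ definition above) =====
theorem guess_seq_spec : Claim_equal_guess_seq := by
  intro seq _
  unfold Spec_guess_seq
  rw [guess_seq_eq_range]
  have hB := guess_seq_alt_best seq
  cases halt : guess_seq_alt seq with
  | none =>
    rw [halt] at hB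
    apply List.findSome?_eq_none_iff.mpr
    intro k _
    apply pvStepA_none
    intro p
    cases hv : pvValid seq k p with
    | false => rfl
    | true => exact absurd hv (hB k p)
  | some out =>
    rw [halt] at hB
    obtain ⟨i0, q0, hv, rfl, hmin⟩ := hB
    apply pv_findSome?_range_first _ _ i0
    · obtain ⟨h2, hb⟩ := pvValid_facts seq i0 q0 hv
      omega
    · intro j hj
      apply pvStepA_none
      intro p
      cases hvp : pvValid seq j p with
      | false => rfl
      | true =>
        have := hmin j p hvp
        omega
    · exact pvStepA_some seq i0 q0 hv
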